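-- pv_equiv track=rewrite | github.com/Daba-byte/BOJ | 선남선녀스터디/외계인의기타연주.py | ding_ga
-- ===== SOURCE A (Python) =====
-- def ding_ga(frets):
--     # 각 줄마다 현재 누르고 있는 프렛을 관리할 리스트
--     lines = [[] for _ in range(7)]  # 기타는 6줄: 인덱스 1부터 6까지만 쓸거임
--
--     ding_ga_count = 0  # 딩가딩가
--
--     for line, fret in frets:
--         # 현재 줄에 프렛이 눌려 있을 때
--         while lines[line] and lines[line][-1] > fret:
--             lines[line].pop()  # 높은 음 빼고
--             ding_ga_count += 1  # 딩가
--
--         # 이미 같은 프렛이 눌러져 있는 경우는 무시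
--         if lines[line] and lines[line][-1] == fret:
--             continue  # 안 딩가
--
--         # 더 높은 프렛을 눌러야 하는 경우
--         lines[line].append(fret)  # 높은 음 넣고
--         ding_ga_count += 1  # 딩가
--
--     return ding_ga_count  # 총 딩가는?
-- ===== SOURCE B (Python) =====
-- def ding_ga(frets):
--     lines = [[] for _ in range(7)]
--     count = 0
--     for line, fret in frets:
--         t = lines[line]
--         # t is strictly increasing; pops = elements >= fret, computed at once
--         keep = [x for x in t if x < fret]
--         present = len(keep) < len(t) and t[len(keep)] == fret
--         count += len(t) - len(keep) + (-1 if present else 1)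
--         lines[line] = keep + [fret]
--     return count
-- ===== Notes on version B (the rewrite author's own statement) =====
-- stated objective: alternative
-- what changed: The one-at-a-time pop while-loop is replaced by a single filter of the per-line stack: the number of pops is computed arithmetically as len(t)-len(keep) (adjusted by whether the fret is already pressed) and the new stack is rebuilt as keep+[fret] in one step.
import Mathlib
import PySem

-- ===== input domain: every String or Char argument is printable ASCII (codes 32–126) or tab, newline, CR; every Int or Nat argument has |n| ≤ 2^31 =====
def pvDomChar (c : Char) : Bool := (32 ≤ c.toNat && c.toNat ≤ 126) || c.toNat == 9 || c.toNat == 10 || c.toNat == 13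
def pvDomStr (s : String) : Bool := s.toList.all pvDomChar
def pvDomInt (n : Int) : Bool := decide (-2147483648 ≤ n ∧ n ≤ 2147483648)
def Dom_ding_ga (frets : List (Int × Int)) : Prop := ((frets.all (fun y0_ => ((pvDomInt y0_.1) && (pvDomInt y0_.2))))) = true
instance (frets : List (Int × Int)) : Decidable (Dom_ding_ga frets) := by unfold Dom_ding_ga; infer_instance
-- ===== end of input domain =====

-- B replaces A's one-at-a-time pop loop by a single filter of the sorted per-line stack plus
-- arithmetic on lengths (objective: alternative algorithm, same result).  A mutates no argument.
-- Both ports encode a Python per-line stack as a Lean list with the TOP AT THE HEAD for A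
-- (Python appends/pops at the end) and in Python order (increasing) for B; Python's negative
-- list index lines[line] for -7 <= line < 0 is resolved by pvIdx (line+7), exactly as Python does.

-- ===== PORT A =====
def pvIdx (l : Int) : Nat := (if l < 0 then l + 7 else l).toNat

-- the while-loop: pop while top > fret, counting each pop
def pvPopA : List Int → Int → List Int × Int
  | [], _ => ([], 0)
  | x :: xs, f => if f < x then let r := pvPopA xs f; (r.1, r.2 + 1) else (x :: xs, 0)

def pvStepA (s : List Int) (f : Int) : List Int × Int :=
  let p := pvPopA s f
  if p.1.head? = some f then (p.1, p.2)          -- same fret already pressed: continue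
  else (f :: p.1, p.2 + 1)                        -- press the fret

def pvFoldA : List (Int × Int) → (Nat → List Int) → Int → Int
  | [], _, c => c
  | (l, f) :: rest, s, c =>
    let i := pvIdx l
    let r := pvStepA (s i) f
    pvFoldA rest (fun j => if j = i then r.1 else s j) (c + r.2)

def ding_ga (frets : List (Int × Int)) : Int := pvFoldA frets (fun _ => []) 0

-- ===== PORT B =====
-- one step of Source B: keep = [x for x in t if x < fret]; present test; arithmetic count; keep+[fret]
def pvStepB (t : List Int) (f : Int) : List Int × Int :=
  let keep := t.filter (fun x => decide (x < f))
  let present := decide (keep.length < t.length) && (t[keep.length]? == some f)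
  (keep ++ [f], (t.length : Int) - keep.length + (if present then -1 else 1))

def pvFoldB : List (Int × Int) → (Nat → List Int) → Int → Int
  | [], _, c => c
  | (l, f) :: rest, s, c =>
    let i := pvIdx l
    let r := pvStepB (s i) f
    pvFoldB rest (fun j => if j = i then r.1 else s j) (c + r.2)

def ding_ga_alt (frets : List (Int × Int)) : Int := pvFoldB frets (fun _ => []) 0

-- ===== PRECONDITION & SPEC =====
-- Python A raises IndexError when a line index is outside [-7, 6]; those inputs are excluded.
def Pre_ding_ga (frets : List (Int × Int)) : Prop :=
  ∀ p ∈ frets, -7 ≤ p.1 ∧ p.1 ≤ 6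
instance (frets : List (Int × Int)) : Decidable (Pre_ding_ga frets) := by unfold Pre_ding_ga; infer_instance

def pvWitness_ding_ga : (List (Int × Int)) := [(1, 3), (1, 5), (1, 2), (2, 4), (1, 2)]

def Spec_ding_ga (frets : List (Int × Int)) (out : Int) : Prop := out = ding_ga_alt frets
instance (frets : List (Int × Int)) (out : Int) : Decidable (Spec_ding_ga frets out) := by unfold Spec_ding_ga; infer_instance

-- ===== CLAIM (what is proved, stated in full; the proofs are below) =====
def Claim_equal_ding_ga : Prop := ∀ (frets : List (Int × Int)), Dom_ding_ga frets → Pre_ding_ga frets → Spec_ding_ga frets (ding_ga frets)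

-- ===== LEMMAS AND PROOFS =====

-- popping skips a block of elements all > f
theorem pvPopA_all (f : Int) (u v : List Int) (h : ∀ x ∈ u, f < x) :
    pvPopA (u ++ v) f = ((pvPopA v f).1, (pvPopA v f).2 + u.length) := by
  induction u with
  | nil => simp
  | cons a u ih =>
    have ha : f < a := h a (by simp)
    simp only [List.cons_append, pvPopA, if_pos ha, ih (fun x hx => h x (by simp [hx]))]
    simp only [Prod.mk.injEq, List.length_cons, true_and]
    push_cast; ring

-- popping stops immediately on a list with no element > f
theorem pvPopA_stop (f : Int) (v : List Int) (h : ∀ x ∈ v, ¬ f < x) :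
    pvPopA v f = (v, 0) := by
  cases v with
  | nil => rfl
  | cons a v => simp [pvPopA, h a (by simp)]

-- the core step computation, on an explicit decomposition t = L ++ R
-- (L: the pressed frets below f, R: those at or above f)
theorem step_aux (f : Int) (L R : List Int)
    (hLmem : ∀ x ∈ L, x < f) (hLs : List.Pairwise (· < ·) L)
    (hRmem : ∀ x ∈ R, ¬ x < f)
    (hRtail : ∀ a R', R = a :: R' → ∀ x ∈ R', f < x) :
    pvStepA (L ++ R).reverse f = ((pvStepB (L ++ R) f).1.reverse, (pvStepB (L ++ R) f).2)
      ∧ List.Pairwise (· < ·) (pvStepB (L ++ R) f).1 := by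
  have hfL : L.filter (fun x => decide (x < f)) = L :=
    List.filter_eq_self.mpr (fun x hx => by simpa using hLmem x hx)
  have hfR : R.filter (fun x => decide (x < f)) = [] :=
    List.filter_eq_nil_iff.mpr (fun x hx => by simpa using hRmem x hx)
  have hsorted' : List.Pairwise (· < ·) (L ++ [f]) :=
    List.pairwise_append.mpr ⟨hLs, by simp, fun x hx y hy => by simp at hy; subst hy; exact hLmem x hx⟩
  have hLhead : L.reverse.head? ≠ some f := by
    rcases hh : L.reverse.head? with _ | ⟨b⟩
    · simp
    · have hb : b ∈ L := List.mem_reverse.mp (List.mem_of_mem_head? hh)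
      have := hLmem b hb; simp; omega
  have hLstop : ∀ x ∈ L.reverse, ¬ f < x := by
    intro x hx; have := hLmem x (List.mem_reverse.mp hx); omega
  rcases hR : R with _ | ⟨a, R'⟩
  · -- R = []: nothing pressed at or above f; one press, no pops
    have hB : pvStepB (L ++ ([] : List Int)) f = (L ++ [f], 1) := by
      simp only [pvStepB, List.append_nil, hfL]
      simp
    have hA : pvStepA (L ++ ([] : List Int)).reverse f = (f :: L.reverse, 1) := by
      have hApop : pvPopA (L ++ ([] : List Int)).reverse f = (L.reverse, 0) := by
        simpa using pvPopA_stop f L.reverse hLstop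
      simp only [pvStepA, hApop]
      rw [if_neg hLhead]
      norm_num
    refine ⟨?_, ?_⟩
    · rw [hA, hB]; simp
    · rw [hB]; exact hsorted'
  · have hR'mem : ∀ x ∈ R', f < x := hRtail a R' hR
    have haf : ¬ a < f := hRmem a (hR ▸ (by simp))
    have hkeep : (L ++ a :: R').filter (fun x => decide (x < f)) = L := by
      have : (a :: R').filter (fun x => decide (x < f)) = [] := hR ▸ hfR
      simp [List.filter_append, hfL, this]
    have hidx : (L ++ a :: R')[L.length]? = some a := by
      simp
    have hlen : (L ++ a :: R').length = L.length + R'.length + 1 := by simp; omega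
    by_cases hae : a = f
    · -- the fret is already pressed: pop the |R'| higher frets, no press
      have hB : pvStepB (L ++ a :: R') f = (L ++ [f], (R'.length : Int)) := by
        have hcond : (decide (((L ++ a :: R').filter (fun x => decide (x < f))).length
            < (L ++ a :: R').length) && ((L ++ a :: R')[((L ++ a :: R').filter
            (fun x => decide (x < f))).length]? == some f)) = true := by
          rw [hkeep, hidx, hlen]; simp [hae]
        simp only [pvStepB, hcond, if_pos]
        rw [hkeep, hlen]
        simp [Prod.ext_iff]
        ring
      have hA : pvStepA (L ++ a :: R').reverse f = (a :: L.reverse, (R'.length : Int)) := by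
        have hApop : pvPopA (L ++ a :: R').reverse f = (a :: L.reverse, (R'.length : Int)) := by
          have hsplit : (L ++ a :: R').reverse = R'.reverse ++ (a :: L.reverse) := by simp
          rw [hsplit, pvPopA_all f R'.reverse (a :: L.reverse)
            (fun x hx => hR'mem x (List.mem_reverse.mp hx))]
          rw [pvPopA_stop f (a :: L.reverse) (by
            intro x hx
            rcases List.mem_cons.mp hx with h1 | h1
            · omega
            · exact hLstop x h1)]
          simp
        simp only [pvStepA, hApop]
        rw [if_pos (by simp [hae])]
      refine ⟨?_, ?_⟩
      · rw [hA, hB]; simp [hae]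
      · rw [hB]; exact hsorted'
    · -- a > f: pop all |R| higher frets, then press f
      have hfa : f < a := by omega
      have hB : pvStepB (L ++ a :: R') f = (L ++ [f], (R'.length : Int) + 2) := by
        have hcond : (decide (((L ++ a :: R').filter (fun x => decide (x < f))).length
            < (L ++ a :: R').length) && ((L ++ a :: R')[((L ++ a :: R').filter
            (fun x => decide (x < f))).length]? == some f)) = false := by
          rw [hkeep, hidx]; simp; omega
        simp only [pvStepB, hcond]
        rw [hkeep, hlen]
        simp [Prod.ext_iff]
        ring
      have hA : pvStepA (L ++ a :: R').reverse f = (f :: L.reverse, (R'.length : Int) + 2) := by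
        have hApop : pvPopA (L ++ a :: R').reverse f = (L.reverse, (R'.length : Int) + 1) := by
          have hsplit : (L ++ a :: R').reverse = (a :: R').reverse ++ L.reverse := by simp
          rw [hsplit, pvPopA_all f (a :: R').reverse L.reverse (by
            intro x hx
            rcases List.mem_cons.mp (by simpa using List.mem_reverse.mp hx) with h1 | h1
            · omega
            · exact hR'mem x h1)]
          rw [pvPopA_stop f L.reverse hLstop]
          simp
        simp only [pvStepA, hApop]
        rw [if_neg hLhead]
        simp [Prod.ext_iff]
        ring
      refine ⟨?_, ?_⟩
      · rw [hA, hB]; simp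
      · rw [hB]; exact hsorted'

-- decompose a strictly increasing stack at f and apply step_aux
theorem step_main (t : List Int) (f : Int) (h : List.Pairwise (· < ·) t) :
    pvStepA t.reverse f = ((pvStepB t f).1.reverse, (pvStepB t f).2)
      ∧ List.Pairwise (· < ·) (pvStepB t f).1 := by
  have hLR : t.takeWhile (fun x => decide (x < f)) ++ t.dropWhile (fun x => decide (x < f)) = t :=
    List.takeWhile_append_dropWhile
  have hLmem : ∀ x ∈ t.takeWhile (fun x => decide (x < f)), x < f := by
    intro x hx; simpa using List.mem_takeWhile_imp hx
  have hLs : List.Pairwise (· < ·) (t.takeWhile (fun x => decide (x < f))) :=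
    h.sublist (List.takeWhile_sublist _)
  have hRs : List.Pairwise (· < ·) (t.dropWhile (fun x => decide (x < f))) :=
    h.sublist (List.dropWhile_sublist _)
  have hRmem : ∀ x ∈ t.dropWhile (fun x => decide (x < f)), ¬ x < f := by
    intro x hx
    rcases hd : t.dropWhile (fun x => decide (x < f)) with _ | ⟨a, R'⟩
    · simp [hd] at hx
    · have hhead : ¬ a < f := by
        have := List.head?_dropWhile_not (fun x => decide (x < f)) t
        rw [hd] at this; simpa using this
      rw [hd] at hx
      rcases List.mem_cons.mp hx with h1 | h1
      · omega
      · have : a < x := (List.pairwise_cons.mp (hd ▸ hRs)).1 x h1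
        omega
  have hRtail : ∀ a R', t.dropWhile (fun x => decide (x < f)) = a :: R' → ∀ x ∈ R', f < x := by
    intro a R' hd x hx
    have hhead : ¬ a < f := by
      have := List.head?_dropWhile_not (fun x => decide (x < f)) t
      rw [hd] at this; simpa using this
    have : a < x := (List.pairwise_cons.mp (hd ▸ hRs)).1 x hx
    omega
  have := step_aux f (t.takeWhile (fun x => decide (x < f))) (t.dropWhile (fun x => decide (x < f)))
    hLmem hLs hRmem hRtail
  rwa [hLR] at this

-- the fold invariant: A's state is pointwise the reverse of B's, B's stacks strictly increasing
theorem fold_main (frets : List (Int × Int)) :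
    ∀ (sA sB : Nat → List Int) (c : Int),
      (∀ i, sA i = (sB i).reverse ∧ List.Pairwise (· < ·) (sB i)) →
      pvFoldA frets sA c = pvFoldB frets sB c := by
  induction frets with
  | nil => intro sA sB c _; rfl
  | cons lf rest ih =>
    rintro sA sB c hinv
    obtain ⟨l, f⟩ := lf
    obtain ⟨hrev, hsort⟩ := hinv (pvIdx l)
    obtain ⟨hstep, hsort'⟩ := step_main (sB (pvIdx l)) f hsort
    rw [← hrev] at hstep
    simp only [pvFoldA, pvFoldB, hstep]
    exact ih _ _ _ (by
      intro i
      by_cases hi : i = pvIdx l <;> simp [hi, hsort']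
      exact hinv i)

-- ===== VERDICT (by name: the statement is the Claim_ definition above) =====
theorem ding_ga_spec : Claim_equal_ding_ga := by
  intro frets _ _
  unfold Spec_ding_ga ding_ga ding_ga_alt
  exact fold_main frets _ _ _ (by intro i; simp)
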